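-- pv_equiv track=rewrite | github.com/Osmanllari/CovidPredictions | covid-split.py | update_new_cases
-- ===== SOURCE A (Python) =====
-- def update_new_cases(new_cases):
--     i = len(new_cases) - 1
--     while i >= 0:
--         if new_cases[i] > 50:
--             week_cases = new_cases[i]
--             week_len = 1
--             j = i - 1
--             while j >= 0 and new_cases[j] == 0:
--                 week_len += 1
--                 j -= 1
--             daily_cases = round(week_cases / week_len)
--             for k in range(j + 1, i + 1):
--                 new_cases[k] = daily_cases
--             i = j
--         else:
--             i -= 1
--     return new_cases
-- ===== SOURCE B (Python) =====
-- def update_new_cases(new_cases):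
--     # Single forward pass building a fresh list with a trailing-zeros counter,
--     # then written back in place (A mutates its argument; B preserves that).
--     result = []
--     zeros = 0
--     for v in new_cases:
--         if v == 0:
--             result.append(0)
--             zeros += 1
--         elif v > 50:
--             daily = round(v / (zeros + 1))
--             result[len(result) - zeros:] = [daily] * (zeros + 1)
--             zeros = 0
--         else:
--             result.append(v)
--             zeros = 0
--     new_cases[:] = result
--     return new_cases
-- ===== Notes on version B (the rewrite author's own statement) =====
-- stated objective: alternative
-- what changed: Replaces A's backward index loop with nested zero-scan and in-place random-access fills by a single forward pass that builds a fresh list while maintaining a trailing-zeros counter (written back in place at the end).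
import Mathlib
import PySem

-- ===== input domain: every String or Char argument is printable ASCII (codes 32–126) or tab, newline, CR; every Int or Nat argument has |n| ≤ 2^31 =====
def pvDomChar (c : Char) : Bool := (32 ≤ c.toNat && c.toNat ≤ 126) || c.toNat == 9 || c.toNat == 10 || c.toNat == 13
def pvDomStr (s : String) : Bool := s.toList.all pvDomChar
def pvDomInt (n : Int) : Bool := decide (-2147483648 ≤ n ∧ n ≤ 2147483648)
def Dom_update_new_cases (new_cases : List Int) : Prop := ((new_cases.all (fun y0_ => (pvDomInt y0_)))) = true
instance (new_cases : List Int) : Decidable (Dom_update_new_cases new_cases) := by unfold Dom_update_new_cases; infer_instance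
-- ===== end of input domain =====

-- B replaces A's backward index loop (nested zero-scan, in-place fills) by one forward
-- pass with a trailing-zeros counter building a fresh list; both Pythons mutate the
-- argument in place (B writes its result back): the equivalence proved is about the
-- return value.


-- ===== PORT A =====
-- round(v / n) for 0 < n: rational round-half-to-even, which is exactly what Python's
-- round(v / n) computes for the |v| ≤ 2^31 integers of Dom (the float quotient never
-- crosses a half-integer boundary there). Used by both ports: both Pythons call the
-- same built-in round on the same arguments.
def pyRoundDiv (v n : Int) : Int :=
  let q := PySem.Int.floordiv v n
  let r := PySem.Int.mod v n
  if 2 * r < n then q else if n < 2 * r then q + 1 else if q % 2 = 0 then q else q + 1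

-- A's inner 'while j >= 0 and new_cases[j] == 0' loop, threading (week_len, j).
-- The Nat argument is an exact fuel bound ((j+1).toNat at every call), a pure
-- totality guard: when it reaches 0 we have j < 0 and the while-condition is
-- false anyway, so the returned (week_len, j) is what Python returns.
def zscanA (arr : List Int) : Int → Int → Nat → Int × Int
  | week_len, j, 0 => (week_len, j)
  | week_len, j, f + 1 =>
    if 0 ≤ j ∧ PySem.List.pyGetD arr j 0 = 0 then zscanA arr (week_len + 1) (j - 1) f
    else (week_len, j)

-- A's outer 'while i >= 0' loop (the for-k fill is the foldl over range(j+1, i+1)).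
-- Again the Nat argument is exact fuel ((i+1).toNat ≤ fuel at every call, and the
-- loop body only ever decreases i), a pure totality guard.
def loopA : List Int → Int → Nat → List Int
  | arr, _, 0 => arr
  | arr, i, f + 1 =>
    if 0 ≤ i then
      if PySem.List.pyGetD arr i 0 > 50 then
        let week_cases := PySem.List.pyGetD arr i 0
        let p := zscanA arr 1 (i - 1) i.toNat
        let daily := pyRoundDiv week_cases p.1
        let arr' := (PySem.List.pyRange (p.2 + 1) (i + 1) 1).foldl
          (fun a k => PySem.List.pySetD a k daily) arr
        loopA arr' p.2 f
      else loopA arr (i - 1) f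
    else arr

def update_new_cases (new_cases : List Int) : List Int :=
  loopA new_cases ((new_cases.length : Int) - 1) new_cases.length

-- ===== PORT B =====
-- one step of B's for-loop; state = (result, zeros)
def stepB (s : List Int × Int) (v : Int) : List Int × Int :=
  if v = 0 then (s.1 ++ [0], s.2 + 1)
  else if v > 50 then
    let daily := pyRoundDiv v (s.2 + 1)
    (s.1.take (s.1.length - s.2.toNat) ++ List.replicate (s.2.toNat + 1) daily, 0)
  else (s.1 ++ [v], 0)

def update_new_cases_alt (new_cases : List Int) : List Int :=
  (new_cases.foldl stepB (([] : List Int), (0 : Int))).1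

-- ===== PRECONDITION & SPEC =====
def Spec_update_new_cases (new_cases : List Int) (out : List Int) : Prop := out = update_new_cases_alt new_cases
instance (new_cases : List Int) (out : List Int) : Decidable (Spec_update_new_cases new_cases out) := by unfold Spec_update_new_cases; infer_instance

-- ===== CLAIM (what is proved, stated in full; the proofs are below) =====
def Claim_equal_update_new_cases : Prop := ∀ (new_cases : List Int), Dom_update_new_cases new_cases → Spec_update_new_cases new_cases (update_new_cases new_cases)

-- ===== LEMMAS AND PROOFS =====

theorem stepB_inv (res : List Int) (z v : Int) (h0 : 0 ≤ z) (hz : z.toNat ≤ res.length) :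
    (stepB (res, z) v).1.length = res.length + 1 ∧ 0 ≤ (stepB (res, z) v).2 ∧
      (stepB (res, z) v).2.toNat ≤ (stepB (res, z) v).1.length := by
  unfold stepB
  split_ifs <;> simp_all <;> omega
theorem foldl_stepB_inv (p : List Int) : ∀ (res : List Int) (z : Int), 0 ≤ z →
    z.toNat ≤ res.length →
    (p.foldl stepB (res, z)).1.length = res.length + p.length ∧
      0 ≤ (p.foldl stepB (res, z)).2 ∧
      (p.foldl stepB (res, z)).2.toNat ≤ (p.foldl stepB (res, z)).1.length := by
  induction p with
  | nil => intro res z h0 hz; simp; omega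
  | cons v p ih =>
    intro res z h0 hz
    have h := stepB_inv res z v h0 hz
    have := ih (stepB (res, z) v).1 (stepB (res, z) v).2 h.2.1 h.2.2
    simp only [List.foldl_cons] at *
    constructor
    · rw [this.1, h.1]; simp [Nat.add_assoc, Nat.add_comm 1]
    · exact this.2
theorem foldl_stepB_zeros (k : Nat) : ∀ (res : List Int) (z : Int),
    (List.replicate k (0 : Int)).foldl stepB (res, z) = (res ++ List.replicate k 0, z + k) := by
  induction k with
  | zero => simp
  | succ k ih =>
    intro res z
    rw [List.replicate_succ, List.foldl_cons]
    have : stepB (res, z) 0 = (res ++ [0], z + 1) := by simp [stepB]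
    rw [this, ih]
    simp
    omega
theorem stepB_snd_of_ne (s : List Int × Int) (v : Int) (hv : v ≠ 0) : (stepB s v).2 = 0 := by
  unfold stepB; split_ifs <;> simp_all
theorem fill_eq (d : Int) : ∀ (k a : Nat) (arr : List Int), a + k ≤ arr.length →
    ((PySem.List.pyRange (a : Int) ((a + k : Nat) : Int) 1).foldl (fun x j => PySem.List.pySetD x j d) arr) =
      arr.take a ++ List.replicate k d ++ arr.drop (a + k) := by
  intro k
  induction k with
  | zero => intro a arr h; simp [PySem.List.pyRange_one_eq_nil]
  | succ k ih =>
    intro a arr h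
    have hcons : PySem.List.pyRange (a : Int) ((a + (k+1) : Nat) : Int) 1
        = (a : Int) :: PySem.List.pyRange ((a : Int) + 1) ((a + (k+1) : Nat) : Int) 1 := by
      apply PySem.List.pyRange_one_cons; push_cast; omega
    rw [hcons, List.foldl_cons]
    have h1 : PySem.List.pySetD arr (a : Int) d = arr.set a d := by simp
    rw [h1]
    have h2 : ((a : Int) + 1) = ((a + 1 : Nat) : Int) := by push_cast; ring
    have h3 : ((a + (k+1) : Nat) : Int) = (((a+1) + k : Nat) : Int) := by push_cast; ring
    rw [h2, h3, ih (a+1) (arr.set a d) (by simp; omega)]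
    have hlen : a < arr.length := by omega
    apply List.ext_getElem
    · simp; omega
    · intro i hi1 hi2
      simp [List.getElem_append, List.getElem_take, List.getElem_drop, List.getElem_set]
      split_ifs <;> first | rfl | omega | simp | (exfalso; omega) | (congr 1 <;> omega) | (congr 1)
theorem zscanA_spec (arr : List Int) : ∀ (f : Nat) (wl j : Int), f = (j + 1).toNat →
    (zscanA arr wl j f).2 ≤ j ∧ (zscanA arr wl j f).1 = wl + j - (zscanA arr wl j f).2 ∧
      (∀ k : Int, (zscanA arr wl j f).2 < k → k ≤ j → PySem.List.pyGetD arr k 0 = 0) ∧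
      ((zscanA arr wl j f).2 < 0 ∨ PySem.List.pyGetD arr (zscanA arr wl j f).2 0 ≠ 0) ∧
      (-1 ≤ j → -1 ≤ (zscanA arr wl j f).2) := by
  intro f
  induction f with
  | zero =>
    intro wl j hf
    refine ⟨le_refl _, by simp only [zscanA]; omega, by intro k h1 h2; simp only [zscanA] at h1; omega,
      ?_, by simp only [zscanA]; omega⟩
    left; simp only [zscanA]; omega
  | succ f ih =>
    intro wl j hf
    by_cases h : 0 ≤ j ∧ PySem.List.pyGetD arr j 0 = 0
    · have hstep : zscanA arr wl j (f + 1) = zscanA arr (wl + 1) (j - 1) f := by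
        simp [zscanA, h]
      have ihh := ih (wl + 1) (j - 1) (by omega)
      rw [hstep]
      refine ⟨by omega, by omega, ?_, ihh.2.2.2.1, fun _ => ihh.2.2.2.2 (by omega)⟩
      intro k hk1 hk2
      rcases eq_or_lt_of_le hk2 with rfl | hlt
      · exact h.2
      · exact ihh.2.2.1 k hk1 (by omega)
    · have hstep : zscanA arr wl j (f + 1) = (wl, j) := by
        simp only [zscanA, if_neg h]
      rw [hstep]
      refine ⟨le_refl _, by omega, by intro k h1 h2; omega, ?_, by omega⟩
      by_cases h0 : 0 ≤ j
      · right; exact fun hc => h ⟨h0, hc⟩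
      · left; omega

theorem loopA_eq : ∀ (fuel n : Nat) (arr : List Int), n ≤ arr.length → n ≤ fuel →
    loopA arr ((n : Int) - 1) fuel = ((arr.take n).foldl stepB (([] : List Int), (0 : Int))).1 ++ arr.drop n := by
  intro fuel
  induction fuel with
  | zero =>
    intro n arr hn hf
    have hn0 : n = 0 := by omega
    subst hn0
    simp [loopA]
  | succ f IH =>
  intro n arr hn hf
  match n, hn, hf with
  | 0, hn, hf =>
    have h0 : ((0 : Nat) : Int) - 1 = -1 := by norm_num
    rw [h0]
    have : loopA arr (-1) (f + 1) = arr := by simp [loopA]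
    rw [this]; simp
  | (m+1), hn, hf =>
    have hml : m < arr.length := by omega
    have hidx : ((m+1 : Nat) : Int) - 1 = (m : Int) := by push_cast; ring
    rw [hidx, loopA]
    have hget : PySem.List.pyGetD arr (m : Int) 0 = arr[m] := PySem.List.pyGetD_ofNat arr m 0 hml
    rw [if_pos (by positivity : (0:Int) ≤ (m:Int))]
    by_cases hv : PySem.List.pyGetD arr (m : Int) 0 > 50
    · -- week branch
      rw [if_pos hv]
      dsimp only
      have hs := zscanA_spec arr (((m : Int)).toNat) 1 ((m : Int) - 1) (by omega)
      set p := zscanA arr 1 ((m : Int) - 1) (((m : Int)).toNat) with hp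
      obtain ⟨hle, hwl, hzeros, hstop, hgem1⟩ := hs
      have hge : -1 ≤ p.2 := hgem1 (by omega)
      set mN : Nat := (p.2 + 1).toNat with hmN
      have hp2 : p.2 = (mN : Int) - 1 := by omega
      have hmNle : mN ≤ m := by omega
      set z : Nat := m - mN with hz
      have hwl' : p.1 = (z : Int) + 1 := by rw [hwl]; omega
      set d : Int := pyRoundDiv (PySem.List.pyGetD arr (m : Int) 0) p.1 with hd
      -- the fill
      have hrange : (p.2 + 1) = ((mN : Int)) := by omega
      have hhi : ((m : Int) + 1) = ((mN + (z + 1) : Nat) : Int) := by push_cast; omega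
      have hfill : (PySem.List.pyRange (p.2 + 1) ((m : Int) + 1) 1).foldl
            (fun a k => PySem.List.pySetD a k d) arr
          = arr.take mN ++ List.replicate (z + 1) d ++ arr.drop (mN + (z + 1)) := by
        rw [hrange, hhi]; exact fill_eq d (z + 1) mN arr (by omega)
      rw [hfill]
      set arr' : List Int := arr.take mN ++ List.replicate (z + 1) d ++ arr.drop (mN + (z + 1)) with harr'
      have hlen' : arr'.length = arr.length := by
        simp [harr']; omega
      have harrtake : arr'.take mN = arr.take mN := by
        rw [harr', List.append_assoc, List.take_append_of_le_length (by simp; omega), List.take_take]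
        simp
      have harrdrop : arr'.drop mN = List.replicate (z + 1) d ++ arr.drop (m + 1) := by
        have hidx3 : mN + (z + 1) = m + 1 := by omega
        rw [harr', hidx3, List.append_assoc, List.drop_append_of_le_length (by simp; omega)]
        simp
      rw [hp2]
      rw [IH mN arr' (by omega) (by omega), harrtake, harrdrop]
      -- now the RHS
      have htkm : arr.take (m + 1) = arr.take mN ++ List.replicate z 0 ++ [arr[m]] := by
        have h1 : arr.take (m + 1) = arr.take m ++ [arr[m]] := by
          rw [List.take_succ, List.getElem?_eq_getElem hml]; rfl
        have h2 : arr.take m = arr.take mN ++ List.replicate z 0 := by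
          apply List.ext_getElem
          · simp; omega
          · intro i hi1 hi2
            simp only [List.getElem_take]
            rcases Nat.lt_or_ge i mN with hc | hc
            · rw [List.getElem_append_left (by simp [List.length_take]; omega)]
              simp [List.getElem_take]
            · rw [List.getElem_append_right (by simp [List.length_take]; omega)]
              have hiz : i < m := by simp [List.length_take] at hi1; omega
              have := hzeros (i : Int) (by omega) (by omega)
              rw [PySem.List.pyGetD_ofNat arr i 0 (by omega)] at this
              simp [List.getElem_replicate]
              omega
        rw [h1, h2]
      rw [htkm]
      set s0 := (arr.take mN).foldl stepB (([] : List Int), (0 : Int)) with hs0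
      have hs0inv := foldl_stepB_inv (arr.take mN) [] 0 (by omega) (by simp)
      have hs0len : s0.1.length = mN := by
        have h4 := hs0inv.1
        simp only [List.length_take, List.length_nil] at h4
        rw [hs0, h4]
        omega
      have hs0z : s0.2 = 0 := by
        rcases Nat.eq_zero_or_pos mN with h0 | h0
        · simp [hs0, h0]
        · have hstop' : PySem.List.pyGetD arr p.2 0 ≠ 0 := by
            rcases hstop with h | h
            · omega
            · exact h
          rw [hp2] at hstop'
          have hcast : (mN : Int) - 1 = ((mN - 1 : Nat) : Int) := by omega
          rw [hcast, PySem.List.pyGetD_ofNat arr (mN-1) 0 (by omega)] at hstop'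
          have htk : arr.take mN = arr.take (mN - 1) ++ [arr[mN - 1]] := by
            have h5 : arr.take ((mN - 1) + 1) = arr.take (mN - 1) ++ [arr[mN - 1]] := by
              rw [List.take_succ, List.getElem?_eq_getElem (by omega)]; rfl
            rw [← h5]; congr 1; omega
          rw [hs0, htk, List.foldl_append]
          simp only [List.foldl_cons, List.foldl_nil]
          exact stepB_snd_of_ne _ _ hstop'
      have hfoldRHS : ((arr.take mN ++ List.replicate z 0 ++ [arr[m]]).foldl stepB
            (([] : List Int), (0 : Int))).1 = s0.1 ++ List.replicate (z + 1) d := by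
        rw [List.foldl_append, List.foldl_append, ← hs0]
        have hpair : s0 = (s0.1, (0 : Int)) := by rw [← hs0z]
        rw [hpair, foldl_stepB_zeros]
        simp only [List.foldl_cons, List.foldl_nil]
        have hvne : arr[m] ≠ 0 := by rw [hget] at hv; omega
        have hv50 : arr[m] > 50 := by rw [hget] at hv; exact hv
        unfold stepB
        rw [if_neg hvne, if_pos hv50]
        simp only
        have hts : ((0 : Int) + (z : Int)).toNat = z := by omega
        rw [hts]
        have hlen2 : (s0.1 ++ List.replicate z (0 : Int)).length - z = mN := by simp [hs0len]
        rw [hlen2, List.take_append_of_le_length (by omega), List.take_of_length_le (by omega)]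
        congr 2
        rw [hd, hwl', hget]
        congr 1
        omega
      rw [hfoldRHS, List.append_assoc]
    · -- else branch: i -= 1
      rw [if_neg hv]
      have hidx2 : (m : Int) - 1 = ((m : Nat) : Int) - 1 := by push_cast; ring
      rw [hidx2, IH m arr (by omega) (by omega)]
      have htk : arr.take (m + 1) = arr.take m ++ [arr[m]] := by
        rw [List.take_succ, List.getElem?_eq_getElem hml]; rfl
      have hdr : arr.drop m = arr[m] :: arr.drop (m + 1) := List.drop_eq_getElem_cons hml
      rw [htk, List.foldl_append]
      set s0 := (arr.take m).foldl stepB (([] : List Int), (0 : Int)) with hs0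
      simp only [List.foldl_cons, List.foldl_nil]
      by_cases hv0 : arr[m] = 0
      · have : stepB s0 arr[m] = (s0.1 ++ [0], s0.2 + 1) := by rw [hv0]; simp [stepB]
        rw [this, hdr, hv0]
        simp
      · have hv50 : ¬ (arr[m] > 50) := by rw [hget] at hv; omega
        have : stepB s0 arr[m] = (s0.1 ++ [arr[m]], 0) := by
          unfold stepB; rw [if_neg hv0, if_neg (by omega)]
        rw [this, hdr]
        simp

-- ===== VERDICT (by name: the statement is the Claim_ definition above) =====
theorem update_new_cases_spec : Claim_equal_update_new_cases := by
  intro l _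
  unfold Spec_update_new_cases update_new_cases update_new_cases_alt
  simpa using loopA_eq l.length l.length l le_rfl le_rfl
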